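-- pv_equiv track=rewrite | github.com/StevenXoFk/Tarea-taller-Tkinter | convertidor.py | base6_a_base8
-- ===== SOURCE A (Python) =====
-- def base6_a_base8(numero):
--     decimal = 0
--     exponente = 0
--
--     while numero > 0:
--         digitos = numero % 10
--         decimal += digitos * (6 ** exponente)
--         numero //= 10
--         exponente += 1
--
--     binario = 0
--     valor = 1
--     while decimal > 0:
--         todo = decimal % 8
--         binario += todo * valor
--         decimal //= 8
--         valor *= 10
--
--     return binario
-- ===== SOURCE B (Python) =====
-- def base6_a_base8(numero):
--     def valor6(n):
--         # value of n's decimal digits read as base-6 weights (Horner, MSB-first)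
--         return 0 if n <= 0 else valor6(n // 10) * 6 + n % 10
--     def pack8(d):
--         # base-8 digits of d packed back into a decimal integer (Horner, MSB-first)
--         return 0 if d <= 0 else pack8(d // 8) * 10 + d % 8
--     return pack8(valor6(numero))
-- ===== Notes on version B (the rewrite author's own statement) =====
-- stated objective: simpler
-- what changed: Replaced A's two iterative loops with power/multiplier accumulators (6**exponente, valor*=10) by two recursive Horner evaluations processing digits most-significant-first, with no auxiliary accumulators.
import Mathlib
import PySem

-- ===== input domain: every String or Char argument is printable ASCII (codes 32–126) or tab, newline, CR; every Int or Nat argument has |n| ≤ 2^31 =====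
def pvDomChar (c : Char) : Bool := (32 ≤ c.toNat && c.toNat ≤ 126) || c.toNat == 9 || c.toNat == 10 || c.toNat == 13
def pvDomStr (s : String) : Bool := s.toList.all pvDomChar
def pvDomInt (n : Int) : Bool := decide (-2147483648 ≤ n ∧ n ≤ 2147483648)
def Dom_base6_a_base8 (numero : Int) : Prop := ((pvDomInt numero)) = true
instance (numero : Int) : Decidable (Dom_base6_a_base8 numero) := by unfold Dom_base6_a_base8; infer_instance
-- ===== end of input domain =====

-- B replaces A's two accumulator loops by two recursive Horner evaluations (objective: simpler).

-- termination helper for the // 10 and // 8 recursions (cited by decreasing_by)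
theorem pvFloordivToNatLt (n b : Int) (hn : 0 < n) (hb : 1 < b) :
    (PySem.Int.floordiv n b).toNat < n.toNat := by
  have hb0 : (0:Int) < b := by omega
  have h1 : PySem.Int.floordiv n b < n :=
    (PySem.Int.floordiv_lt_iff_lt_mul hb0).mpr (by nlinarith)
  have h2 : 0 ≤ PySem.Int.floordiv n b := by
    rw [PySem.Int.floordiv_eq_ediv_of_pos hb0]
    exact Int.ediv_nonneg (le_of_lt hn) (le_of_lt hb0)
  omega

-- ===== PORT A =====
-- first while loop: digits of `numero` base 10, weighted by 6**exponente
-- (6 ** exponente is ported as 6 ^ exponente.toNat; exact since exponente starts at 0 and only increments)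
def pvLoop1 (numero decimal exponente : Int) : Int :=
  if h : numero > 0 then
    pvLoop1 (PySem.Int.floordiv numero 10)
      (decimal + (PySem.Int.mod numero 10) * 6 ^ exponente.toNat) (exponente + 1)
  else decimal
termination_by numero.toNat
decreasing_by exact pvFloordivToNatLt numero 10 h (by norm_num)

-- second while loop: base-8 digits of `decimal` packed with valor = 1, 10, 100, …
def pvLoop2 (decimal binario valor : Int) : Int :=
  if h : decimal > 0 then
    pvLoop2 (PySem.Int.floordiv decimal 8)
      (binario + (PySem.Int.mod decimal 8) * valor) (valor * 10)
  else binario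
termination_by decimal.toNat
decreasing_by exact pvFloordivToNatLt decimal 8 h (by norm_num)

def base6_a_base8 (numero : Int) : Int :=
  pvLoop2 (pvLoop1 numero 0 0) 0 1

-- ===== PORT B =====
-- value of n's decimal digits read as base-6 weights (Horner, MSB-first)
def pvValor6 (n : Int) : Int :=
  if h : n ≤ 0 then 0
  else pvValor6 (PySem.Int.floordiv n 10) * 6 + PySem.Int.mod n 10
termination_by n.toNat
decreasing_by exact pvFloordivToNatLt n 10 (by omega) (by norm_num)

-- base-8 digits of d packed back into a decimal integer (Horner, MSB-first)
def pvPack8 (d : Int) : Int :=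
  if h : d ≤ 0 then 0
  else pvPack8 (PySem.Int.floordiv d 8) * 10 + PySem.Int.mod d 8
termination_by d.toNat
decreasing_by exact pvFloordivToNatLt d 8 (by omega) (by norm_num)

def base6_a_base8_alt (numero : Int) : Int :=
  pvPack8 (pvValor6 numero)

-- ===== PRECONDITION & SPEC =====
def Spec_base6_a_base8 (numero : Int) (out : Int) : Prop := out = base6_a_base8_alt numero
instance (numero : Int) (out : Int) : Decidable (Spec_base6_a_base8 numero out) := by unfold Spec_base6_a_base8; infer_instance

-- ===== CLAIM (what is proved, stated in full; the proofs are below) =====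
def Claim_equal_base6_a_base8 : Prop := ∀ (numero : Int), Dom_base6_a_base8 numero → Spec_base6_a_base8 numero (base6_a_base8 numero)

-- ===== LEMMAS AND PROOFS =====

theorem pvLoop1_eq (k : Nat) (n acc : Int) :
    pvLoop1 n acc (k : Int) = acc + 6 ^ k * pvValor6 n := by
  induction hm : n.toNat using Nat.strong_induction_on generalizing n acc k with
  | _ m ih =>
    rw [pvLoop1, pvValor6]
    by_cases h : n > 0
    · have hlt : (PySem.Int.floordiv n 10).toNat < m := by
        subst hm; exact pvFloordivToNatLt n 10 h (by norm_num)
      simp only [h, dif_pos, dif_neg (by omega : ¬ n ≤ 0)]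
      have : ((k : Int) + 1) = ((k + 1 : Nat) : Int) := by push_cast; ring
      rw [this]
      have hto : ((k : Int)).toNat = k := by omega
      rw [hto, ih _ hlt _ _ _ rfl]
      ring
    · simp only [h, dif_neg, not_false_iff, dif_pos (by omega : n ≤ 0)]
      ring

theorem pvLoop2_eq (d acc v : Int) :
    pvLoop2 d acc v = acc + v * pvPack8 d := by
  induction hm : d.toNat using Nat.strong_induction_on generalizing d acc v with
  | _ m ih =>
    rw [pvLoop2, pvPack8]
    by_cases h : d > 0
    · have hlt : (PySem.Int.floordiv d 8).toNat < m := by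
        subst hm; exact pvFloordivToNatLt d 8 h (by norm_num)
      simp only [h, dif_pos, dif_neg (by omega : ¬ d ≤ 0)]
      rw [ih _ hlt _ _ _ rfl]
      ring
    · simp only [h, dif_neg, not_false_iff, dif_pos (by omega : d ≤ 0)]
      ring

-- ===== VERDICT (by name: the statement is the Claim_ definition above) =====
theorem base6_a_base8_spec : Claim_equal_base6_a_base8 := by
  intro numero _
  unfold Spec_base6_a_base8 base6_a_base8 base6_a_base8_alt
  have h1 : pvLoop1 numero 0 0 = pvValor6 numero := by
    have := pvLoop1_eq 0 numero 0
    simpa using this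
  rw [h1, pvLoop2_eq]
  ring
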